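-- pv_equiv track=rewrite | github.com/xiiomara19/HB_PROYECTO_FABRICA | Main.py | conseguirPuestosNoFijosActivos
-- ===== SOURCE A (Python) =====
-- def conseguirPuestosNoFijosActivos(lista1, lista2):
--     """
--     Obtiene una lista de los puestos no fijos, es decir, aquellos que no son puestos principales, y que tienen un trabajador asignado.
--     """
--     resultado = []
--     # Crear una copia de lista1 para manejar las ocurrencias
--     copia_lista1 = lista1.copy()
--
--     for elemento in lista2:
--         while elemento in copia_lista1:  # Mientras haya ocurrencias en copia_lista1
--             resultado.append(elemento)
--             copia_lista1.remove(elemento)  # Remueve una ocurrencia por vez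
--
--     return resultado
-- ===== SOURCE B (Python) =====
-- def conseguirPuestosNoFijosActivos(lista1, lista2):
--     """
--     Obtiene una lista de los puestos no fijos, es decir, aquellos que no son puestos principales, y que tienen un trabajador asignado.
--     """
--     count = {}
--     for x in lista1:
--         count[x] = count.get(x, 0) + 1
--     resultado = []
--     for e in dict.fromkeys(lista2):
--         resultado.extend([e] * count.get(e, 0))
--     return resultado
-- ===== Notes on version B (the rewrite author's own statement) =====
-- stated objective: faster
-- what changed: Replace the quadratic nested while-remove scan over a mutated copy of lista1 by a single frequency-table pass over lista1 plus one emission pass over the order-preserving unique values of lista2.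
import Mathlib
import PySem

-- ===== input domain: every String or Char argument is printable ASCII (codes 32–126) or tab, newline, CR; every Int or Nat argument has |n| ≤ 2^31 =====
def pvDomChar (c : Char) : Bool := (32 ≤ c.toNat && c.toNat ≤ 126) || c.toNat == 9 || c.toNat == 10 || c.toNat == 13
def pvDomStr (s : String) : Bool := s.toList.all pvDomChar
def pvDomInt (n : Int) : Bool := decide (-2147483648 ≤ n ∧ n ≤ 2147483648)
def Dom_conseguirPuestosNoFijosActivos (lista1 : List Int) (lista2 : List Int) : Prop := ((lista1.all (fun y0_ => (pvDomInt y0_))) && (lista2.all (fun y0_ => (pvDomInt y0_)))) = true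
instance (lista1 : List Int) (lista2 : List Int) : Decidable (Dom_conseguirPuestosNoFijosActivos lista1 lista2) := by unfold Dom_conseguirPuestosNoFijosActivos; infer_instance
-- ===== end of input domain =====

-- B replaces A's nested while/remove scan over a mutated copy of lista1 by one counting
-- pass over lista1 plus one emission pass over the first-occurrence-deduplicated lista2.

-- ===== PORT A =====
theorem pvRemoveLenLt {xs ys : List Int} {v : Int} (h : PySem.List.remove? xs v = some ys) :
    ys.length < xs.length := by
  have hv : v ∈ xs := by
    by_contra hv
    rw [(PySem.List.remove?_eq_none_iff xs v).mpr hv] at h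
    simp at h
  rw [PySem.List.remove?_eq_some_erase xs v hv] at h
  have he : ys = xs.erase v := by injection h.symm
  subst he
  rw [List.length_erase_of_mem hv]
  have := List.length_pos_of_mem hv
  omega

def pvWhileA (e : Int) (res : List Int) (copia : List Int) : List Int × List Int :=
  match h : PySem.List.remove? copia e with
  | some copia' => pvWhileA e (res ++ [e]) copia'
  | none => (res, copia)
termination_by copia.length
decreasing_by exact pvRemoveLenLt h


def conseguirPuestosNoFijosActivos (lista1 : List Int) (lista2 : List Int) : List Int :=
  (lista2.foldl (fun st elemento => pvWhileA elemento st.1 st.2) ([], lista1)).1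

-- ===== PORT B =====
def conseguirPuestosNoFijosActivos_alt (lista1 : List Int) (lista2 : List Int) : List Int :=
  -- count = {}; for x in lista1: count[x] = count.get(x, 0) + 1
  let count := lista1.foldl (fun d x => d.insert x (d.getD x 0 + 1)) PySem.Dict.empty
  -- for e in dict.fromkeys(lista2): resultado.extend([e] * count.get(e, 0))
  (PySem.List.dedup lista2).foldl
    (fun resultado e => resultado ++ PySem.List.pyRepeat [e] (count.getD e 0)) []

-- ===== PRECONDITION & SPEC =====
def Spec_conseguirPuestosNoFijosActivos (lista1 : List Int) (lista2 : List Int) (out : List Int) : Prop := out = conseguirPuestosNoFijosActivos_alt lista1 lista2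
instance (lista1 : List Int) (lista2 : List Int) (out : List Int) : Decidable (Spec_conseguirPuestosNoFijosActivos lista1 lista2 out) := by unfold Spec_conseguirPuestosNoFijosActivos; infer_instance

-- ===== CLAIM (what is proved, stated in full; the proofs are below) =====
def Claim_equal_conseguirPuestosNoFijosActivos : Prop := ∀ (lista1 : List Int) (lista2 : List Int), Dom_conseguirPuestosNoFijosActivos lista1 lista2 → Spec_conseguirPuestosNoFijosActivos lista1 lista2 (conseguirPuestosNoFijosActivos lista1 lista2)

-- ===== LEMMAS AND PROOFS =====

theorem pvFilterErase (e : Int) (l : List Int) :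
    (l.erase e).filter (fun y => !(y == e)) = l.filter (fun y => !(y == e)) := by
  induction l with
  | nil => simp
  | cons a as ihc =>
    by_cases hae : a = e
    · subst hae; simp [List.erase_cons_head]
    · rw [List.erase_cons_tail (by simp [hae])]
      simp only [List.filter_cons]
      by_cases hba : (!(a == e)) = true <;> simp_all

theorem pvWhileA_spec (e : Int) (res copia : List Int) :
    pvWhileA e res copia =
      (res ++ List.replicate (copia.count e) e, copia.filter (fun y => !(y == e))) := by
  fun_induction pvWhileA e res copia with
  | case1 res copia copia' h ih =>
    have hv : e ∈ copia := by
      by_contra hv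
      rw [(PySem.List.remove?_eq_none_iff copia e).mpr hv] at h
      simp at h
    have he : copia' = copia.erase e := by
      rw [PySem.List.remove?_eq_some_erase copia e hv] at h
      injection h.symm
    subst he
    rw [ih, Prod.mk.injEq]
    refine ⟨?_, ?_⟩
    · have hc : (copia.erase e).count e = copia.count e - 1 := List.count_erase_self
      have hpos : 0 < copia.count e := List.count_pos_iff.mpr hv
      rw [hc]
      have h2 : copia.count e = (copia.count e - 1) + 1 := by omega
      rw [h2, List.replicate_succ, List.append_assoc]
      simp
    · exact pvFilterErase e copia
  | case2 res copia h =>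
    have hv : e ∉ copia := (PySem.List.remove?_eq_none_iff copia e).mp h
    rw [List.count_eq_zero.mpr hv]
    simp only [List.replicate_zero, List.append_nil]
    rw [List.filter_eq_self.mpr]
    intro a ha
    simp only [Bool.not_eq_eq_eq_not, Bool.not_true, beq_eq_false_iff_ne]
    intro hae; exact hv (hae ▸ ha)

def pvSpecA : List Int → List Int → List Int
  | _, [] => []
  | copia, e :: rest =>
      List.replicate (copia.count e) e ++ pvSpecA (copia.filter (fun y => !(y == e))) rest

theorem pvFoldA_spec (l2 : List Int) (res copia : List Int) :
    (l2.foldl (fun st elemento => pvWhileA elemento st.1 st.2) (res, copia)).1 =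
      res ++ pvSpecA copia l2 := by
  induction l2 generalizing res copia with
  | nil => simp [pvSpecA]
  | cons e rest ih =>
    rw [List.foldl_cons, pvWhileA_spec e res copia, ih]
    conv_rhs => rw [pvSpecA]
    rw [← List.append_assoc]

def pvDedupF : List Int → List Int
  | [] => []
  | x :: xs => x :: pvDedupF (xs.filter (fun y => !(y == x)))
termination_by l => l.length
decreasing_by
  simp only [List.length_unattach, List.length_cons]
  exact Nat.lt_succ_of_le (le_trans (List.length_filter_le _ _) (by simp))

theorem pvDedupF_filter (p : Int → Bool) (l : List Int) :
    pvDedupF (l.filter p) = (pvDedupF l).filter p := by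
  induction l using pvDedupF.induct with
  | case1 => simp [pvDedupF]
  | case2 x xs ih =>
    rw [List.unattach_filter (g := fun y => !(y == x)) (hf := fun a h => rfl),
        List.unattach_attach] at ih
    by_cases hx : p x = true
    · rw [List.filter_cons_of_pos hx, pvDedupF, pvDedupF, List.filter_cons_of_pos hx]
      congr 1
      rw [← ih]
      congr 1
      rw [List.filter_filter, List.filter_filter]
      apply List.filter_congr
      intro a _
      exact Bool.and_comm _ _
    · rw [pvDedupF, List.filter_cons_of_neg hx, List.filter_cons_of_neg hx, ← ih]
      congr 1
      rw [List.filter_filter]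
      apply List.filter_congr
      intro a _
      by_cases hax : a = x
      · subst hax; simp_all
      · simp [hax]

theorem pvFlatMap_filter (copia : List Int) (e : Int) (l : List Int) :
    l.flatMap (fun d => List.replicate ((copia.filter (fun y => !(y == e))).count d) d) =
      (l.filter (fun y => !(y == e))).flatMap
        (fun d => List.replicate (copia.count d) d) := by
  induction l with
  | nil => rfl
  | cons d rest ih =>
    simp only [List.flatMap_cons, List.filter_cons]
    by_cases hde : d = e
    · subst hde
      have hz : (copia.filter (fun y => !(y == d))).count d = 0 := by
        apply List.count_eq_zero.mpr
        intro hmem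
        have := List.of_mem_filter hmem
        simp at this
      simp [hz, ih]
    · have h1 : (!(d == e)) = true := by simp [hde]
      have h2 : (copia.filter (fun y => !(y == e))).count d = copia.count d :=
        List.count_filter h1
      simp [h1, h2, ih, List.flatMap_cons]

theorem pvSpecA_drop (e : Int) (l : List Int) : ∀ copia : List Int, e ∉ copia →
    pvSpecA copia l = pvSpecA copia (l.filter (fun y => !(y == e))) := by
  induction l with
  | nil => simp
  | cons d l' ih =>
    intro copia hce
    by_cases hde : d = e
    · subst hde
      rw [List.filter_cons_of_neg (by simp), pvSpecA, List.count_eq_zero.mpr hce,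
          List.replicate_zero, List.nil_append,
          List.filter_eq_self.mpr (by intro a ha; simp; intro h; exact hce (h ▸ ha)),
          ih copia hce]
    · rw [List.filter_cons_of_pos (by simp [hde]), pvSpecA, pvSpecA,
          ih _ (fun hmem => hce (List.mem_of_mem_filter hmem))]

theorem pvSpecA_flatMap (l2 : List Int) : ∀ copia : List Int,
    pvSpecA copia l2 = (pvDedupF l2).flatMap (fun d => List.replicate (copia.count d) d) := by
  induction l2 using pvDedupF.induct with
  | case1 => intro copia; simp [pvSpecA, pvDedupF]
  | case2 e rest ih =>
    intro copia
    rw [List.unattach_filter (g := fun y => !(y == e)) (hf := fun a h => rfl),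
        List.unattach_attach] at ih
    rw [pvSpecA, pvDedupF, List.flatMap_cons]
    congr 1
    rw [pvSpecA_drop e rest (copia.filter (fun y => !(y == e)))
          (fun hmem => by have := List.of_mem_filter hmem; simp at this),
        ih, pvFlatMap_filter, ← pvDedupF_filter,
        show (rest.filter (fun y => !(y == e))).filter (fun y => !(y == e))
            = rest.filter (fun y => !(y == e)) from by
          rw [List.filter_filter]; apply List.filter_congr; intro a _; simp]

theorem pvOfList_foldl (s : PySem.Set Int) (l : List Int) :
    List.foldl PySem.Set.add s l = s ++ pvDedupF (l.filter (fun y => !(s.contains y))) := by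
  induction l generalizing s with
  | nil => simp [pvDedupF]
  | cons x xs ih =>
    simp only [List.foldl_cons]
    rw [PySem.Set.add]
    by_cases hx : PySem.Set.contains s x = true
    · rw [if_pos hx, ih, List.filter_cons_of_neg (by simp [PySem.Set.contains] at hx ⊢; exact hx)]
    · rw [if_neg hx, ih (s ++ [x]), List.filter_cons_of_pos (by simp [PySem.Set.contains] at hx ⊢; exact hx), pvDedupF]
      have hfeq : xs.filter (fun y => !((s ++ [x]).contains y)) =
          (xs.filter (fun y => !(s.contains y))).filter (fun y => !(y == x)) := by
        rw [List.filter_filter]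
        apply List.filter_congr
        intro a _
        simp only [PySem.Set.contains] at *
        simp only [List.contains_append, List.contains_cons, List.contains_nil]
        cases h1 : List.contains s a <;> cases h2 : a == x <;> simp_all
      rw [hfeq, List.append_assoc]
      simp

theorem pvDedup_eq (l : List Int) : PySem.List.dedup l = pvDedupF l := by
  rw [PySem.List.dedup, PySem.Set.ofList, pvOfList_foldl]
  simp [PySem.Set.empty, PySem.Set.contains]


-- ===== VERDICT (by name: the statement is the Claim_ definition above) =====
theorem conseguirPuestosNoFijosActivos_spec : Claim_equal_conseguirPuestosNoFijosActivos := by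
  intro lista1 lista2 _
  unfold Spec_conseguirPuestosNoFijosActivos
  unfold conseguirPuestosNoFijosActivos conseguirPuestosNoFijosActivos_alt
  rw [pvFoldA_spec, List.nil_append, pvSpecA_flatMap, pvDedup_eq]
  rw [PySem.List.foldl_append_eq_flatMap, List.nil_append]
  congr 1
  funext d
  rw [PySem.Dict.getD_foldl_insert_add_one, PySem.Dict.getD_empty, PySem.List.pyRepeat_singleton]
  simp
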